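-- pv_equiv track=rewrite | github.com/Yiif4n/-offer | 067-机器人运动范围/067-movingCount.py | notvalid
-- ===== SOURCE A (Python) =====
-- def notvalid(threshold,i,j):
--     res=0
--     while i:
--         res+=i%10
--         i=i//10
--     while j:
--         res+=j%10
--         j=j//10
--     return res>threshold
-- ===== SOURCE B (Python) =====
-- def notvalid(threshold, i, j):
--     res = sum(int(c) for c in str(i)) + sum(int(c) for c in str(j))
--     return res > threshold
-- ===== Notes on version B (the rewrite author's own statement) =====
-- stated objective: idiomatic
-- what changed: Digit sums are computed by iterating over the characters of str(i) and str(j) instead of an arithmetic mod/floordiv extraction loop.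
import Mathlib
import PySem

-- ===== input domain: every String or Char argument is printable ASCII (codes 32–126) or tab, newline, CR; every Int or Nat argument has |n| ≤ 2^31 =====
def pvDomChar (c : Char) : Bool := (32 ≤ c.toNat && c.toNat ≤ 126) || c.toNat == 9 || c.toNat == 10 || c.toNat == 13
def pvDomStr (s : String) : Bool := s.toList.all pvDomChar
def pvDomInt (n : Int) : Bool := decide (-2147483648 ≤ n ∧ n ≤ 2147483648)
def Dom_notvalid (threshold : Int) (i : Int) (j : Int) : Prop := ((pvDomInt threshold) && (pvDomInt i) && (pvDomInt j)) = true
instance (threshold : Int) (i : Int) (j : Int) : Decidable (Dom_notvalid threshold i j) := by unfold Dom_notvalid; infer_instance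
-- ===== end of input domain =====

-- B computes the digit sums by iterating over the characters of str(i)/str(j) instead of
-- arithmetic mod/floordiv loops (idiomatic rewrite, same cost). Pre_ restricts to i, j ≥ 0:
-- on negative i or j the Python A never terminates (i//10 stabilises at -1).


-- ===== PORT A =====
-- the 'while i: res += i%10; i = i//10' loop; Python's 'while i:' tests i ≠ 0 and never
-- terminates for negative i (excluded by Pre_), so the total guard here is 0 < n
def pvLoopA (res : Int) (n : Int) : Int :=
  if h : 0 < n then pvLoopA (res + PySem.Int.mod n 10) (PySem.Int.floordiv n 10) else res
termination_by n.toNat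
decreasing_by
  simp only [PySem.Int.floordiv_eq_ediv_of_pos (by norm_num : (0:Int) < 10)]
  omega

def notvalid (threshold : Int) (i : Int) (j : Int) : Bool :=
  decide (pvLoopA (pvLoopA 0 i) j > threshold)

-- ===== PORT B =====
-- sum(int(c) for c in str(n)); int(c) ported as c.toNat - 48, exact on digit characters
-- (inside Pre_ every character of str(n) is a digit)
def pvDigitCharsSum (s : String) : Int :=
  (s.toList.map (fun c => ((c.toNat : Int) - 48))).sum

def notvalid_alt (threshold : Int) (i : Int) (j : Int) : Bool :=
  decide (pvDigitCharsSum (PySem.Int.toStr i) + pvDigitCharsSum (PySem.Int.toStr j) > threshold)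

-- ===== PRECONDITION & SPEC =====
-- Pre_ excludes negative i or j: there the Python A loops forever (returns nothing).
def Pre_notvalid (threshold : Int) (i : Int) (j : Int) : Prop := 0 ≤ i ∧ 0 ≤ j
instance (threshold : Int) (i : Int) (j : Int) : Decidable (Pre_notvalid threshold i j) := by unfold Pre_notvalid; infer_instance
def pvWitness_notvalid : Int × Int × Int := (3, 12, 34)

def Spec_notvalid (threshold : Int) (i : Int) (j : Int) (out : Bool) : Prop := out = notvalid_alt threshold i j
instance (threshold : Int) (i : Int) (j : Int) (out : Bool) : Decidable (Spec_notvalid threshold i j out) := by unfold Spec_notvalid; infer_instance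

-- ===== CLAIM (what is proved, stated in full; the proofs are below) =====
def Claim_equal_notvalid : Prop := ∀ (threshold : Int) (i : Int) (j : Int), Dom_notvalid threshold i j → Pre_notvalid threshold i j → Spec_notvalid threshold i j (notvalid threshold i j)

-- ===== LEMMAS AND PROOFS =====

-- reference digit sum, used to relate the two ports
def pvDsum : Nat → Nat
  | 0 => 0
  | n+1 => (n+1) % 10 + pvDsum ((n+1)/10)
decreasing_by omega

theorem pvDsum_pos {n : Nat} (h : n ≠ 0) : pvDsum n = n % 10 + pvDsum (n / 10) := by
  cases n with
  | zero => exact absurd rfl h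
  | succ m => rw [pvDsum]

theorem pvLoopA_eq (m : Nat) : ∀ r : Int, pvLoopA r (m : Int) = r + (pvDsum m : Int) := by
  induction m using Nat.strong_induction_on with
  | _ m ih =>
    intro r
    rw [pvLoopA]
    by_cases hm : m = 0
    · subst hm; simp [pvDsum]
    · have hpos : (0:Int) < (m : Int) := by exact_mod_cast Nat.pos_of_ne_zero hm
      rw [dif_pos hpos]
      rw [show PySem.Int.floordiv (m : Int) 10 = ((m / 10 : Nat) : Int) from
        PySem.Int.floordiv_natCast m 10]
      rw [show PySem.Int.mod (m : Int) 10 = ((m % 10 : Nat) : Int) from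
        PySem.Int.mod_natCast m 10]
      rw [ih (m / 10) (Nat.div_lt_self (Nat.pos_of_ne_zero hm) (by norm_num)) _]
      rw [pvDsum_pos hm]
      push_cast
      ring

theorem pvDigitChar_toNat {d : Nat} (h : d < 10) : (Nat.digitChar d).toNat = d + 48 := by
  interval_cases d <;> decide

theorem pvToDigitsCore_sum (fuel : Nat) : ∀ (n : Nat) (ds : List Char), n < 10 ^ fuel →
    ((Nat.toDigitsCore 10 fuel n ds).map (fun c => ((c.toNat : Int) - 48))).sum
      = (pvDsum n : Int) + ((ds.map (fun c => ((c.toNat : Int) - 48))).sum) := by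
  induction fuel with
  | zero =>
    intro n ds h
    interval_cases n
    simp [Nat.toDigitsCore, pvDsum]
  | succ fuel ih =>
    intro n ds h
    rw [Nat.toDigitsCore]
    by_cases hz : n / 10 = 0
    · have hn : n < 10 := by omega
      rw [if_pos hz]
      simp only [List.map_cons, List.sum_cons, pvDigitChar_toNat (Nat.mod_lt _ (by norm_num))]
      by_cases h0 : n = 0
      · subst h0; simp [pvDsum]
      · rw [pvDsum_pos h0, hz]
        push_cast [Nat.mod_eq_of_lt hn]
        simp [pvDsum]
    · rw [if_neg hz]
      have hlt : n / 10 < 10 ^ fuel := by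
        have : n < 10 * 10 ^ fuel := by rw [← pow_succ']; exact h
        omega
      rw [ih (n / 10) _ hlt]
      have h0 : n ≠ 0 := by omega
      rw [pvDsum_pos h0]
      simp only [List.map_cons, List.sum_cons, pvDigitChar_toNat (Nat.mod_lt _ (by norm_num))]
      push_cast
      ring

theorem pvDigitCharsSum_toStr (m : Nat) :
    pvDigitCharsSum (PySem.Int.toStr (m : Int)) = (pvDsum m : Int) := by
  unfold pvDigitCharsSum PySem.Int.toStr PySem.Int.toChars
  rw [if_neg (Int.not_lt.mpr (Int.natCast_nonneg m))]
  have hlt : m < 10 ^ (m + 1) := by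
    calc m < m + 1 := Nat.lt_succ_self m
    _ ≤ 10 ^ (m + 1) := Nat.le_of_lt (Nat.lt_pow_self (by norm_num))
  simpa [Nat.toDigits, String.toList_ofList] using pvToDigitsCore_sum (m + 1) m [] (by simpa using hlt)

-- ===== VERDICT (by name: the statement is the Claim_ definition above) =====
theorem notvalid_spec : Claim_equal_notvalid := by
  intro t i j _ hpre
  obtain ⟨hi, hj⟩ := hpre
  unfold Spec_notvalid notvalid notvalid_alt
  obtain ⟨m, rfl⟩ := Int.eq_ofNat_of_zero_le hi
  obtain ⟨k, rfl⟩ := Int.eq_ofNat_of_zero_le hj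
  rw [pvLoopA_eq m 0, pvLoopA_eq k _, pvDigitCharsSum_toStr, pvDigitCharsSum_toStr]
  norm_num
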